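-- pv_equiv track=rewrite | github.com/ASSERT-KTH/DET-Gen | experiments/pynguin/c4b/return-lst/generated_tests/src_427/2/src_427.py | func
-- ===== SOURCE A (Python) =====
-- def func(*args):
-- 	ret_values = []
--
-- 	s = args[0].strip()
-- 	glas = 'AEIOUY'
-- 	ll = [0]
-- 	j = 0
-- 	for i in range(1, (len(s) + 1)):
-- 	    if (s[(i - 1)] in glas):
-- 	        ll.append((i - j))
-- 	        j = i
-- 	ll.append(((len(s) - j) + 1))
-- 	ret_values.append(max(ll))
--
-- 	return ret_values
-- ===== SOURCE B (Python) =====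
-- def func(*args):
--     s = args[0].strip()
--     positions = [i for i, c in enumerate(s, 1) if c in 'AEIOUY']
--     boundaries = [0] + positions + [len(s) + 1]
--     return [max(b - a for a, b in zip(boundaries, boundaries[1:]))]
-- ===== Notes on version B (the rewrite author's own statement) =====
-- stated objective: simpler
-- what changed: Replaces the running-pointer loop with mutable gap list and previous-vowel index by a declarative pipeline: a comprehension collecting 1-indexed vowel positions, sentinel boundaries 0 and len(s)+1, and a max over pairwise differences.
import Mathlib
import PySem

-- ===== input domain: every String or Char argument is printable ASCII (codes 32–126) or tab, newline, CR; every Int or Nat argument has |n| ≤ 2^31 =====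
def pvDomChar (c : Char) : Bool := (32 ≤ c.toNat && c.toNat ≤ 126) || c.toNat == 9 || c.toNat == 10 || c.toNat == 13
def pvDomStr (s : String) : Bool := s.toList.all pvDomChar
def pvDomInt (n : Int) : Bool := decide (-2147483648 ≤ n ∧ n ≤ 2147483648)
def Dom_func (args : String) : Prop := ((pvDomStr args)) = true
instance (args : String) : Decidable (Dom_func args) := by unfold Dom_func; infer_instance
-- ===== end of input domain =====

-- B replaces A's running-pointer loop (mutable gap list + previous-vowel index) by a declarative
-- pipeline: vowel positions via enumerate, sentinel boundaries 0 and len(s)+1, max of pairwise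
-- differences. Objective: simpler. Exact same return value on every input.

-- 'AEIOUY'; for a single character c, Python's `c in 'AEIOUY'` is membership in these chars
def pvVowels : List Char := ['A', 'E', 'I', 'O', 'U', 'Y']

-- ===== PORT A =====
-- s[i-1] is ported with pyGetD: the loop has 1 ≤ i ≤ len(s), so the index is always in range
def func (args : String) : List Int :=
  let s := PySem.Chars.strip args.toList
  let n : Int := PySem.List.len s
  let st := (PySem.List.pyRange 1 (n + 1)).foldl
    (fun (st : List Int × Int) i =>
      if PySem.List.pyGetD s (i - 1) ' ' ∈ pvVowels then (st.1 ++ [i - st.2], i) else st)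
    ([0], 0)
  -- max(ll): ll starts with 0 and is never empty, so maxD's default is unreachable
  [PySem.List.maxD (st.1 ++ [n - st.2 + 1]) (fun x => x) 0]

-- ===== PORT B =====
def func_alt (args : String) : List Int :=
  let s := PySem.Chars.strip args.toList
  let positions := ((PySem.List.enumerate s 1).filter (fun p => p.2 ∈ pvVowels)).map (·.1)
  let boundaries := [(0 : Int)] ++ positions ++ [PySem.List.len s + 1]
  -- max(b - a for a, b in zip(boundaries, boundaries[1:])): ≥ 1 pair, default unreachable
  [PySem.List.maxD ((boundaries.zip (PySem.List.slice boundaries (some 1) none)).map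
      (fun p => p.2 - p.1)) (fun x => x) 0]

-- ===== PRECONDITION & SPEC =====
def Spec_func (args : String) (out : List Int) : Prop := out = func_alt args
instance (args : String) (out : List Int) : Decidable (Spec_func args out) := by unfold Spec_func; infer_instance

-- ===== CLAIM (what is proved, stated in full; the proofs are below) =====
def Claim_equal_func : Prop := ∀ (args : String), Dom_func args → Spec_func args (func args)

-- ===== LEMMAS AND PROOFS =====

-- pairwise differences of consecutive elements (B's zip list)
def pvDiffs (l : List Int) : List Int := (l.zip l.tail).map (fun p => p.2 - p.1)

-- B's 1-indexed vowel positions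
def pvPos (t : List Char) : List Int :=
  ((PySem.List.enumerate t 1).filter (fun p => p.2 ∈ pvVowels)).map (·.1)

lemma pvDiffs_append (l : List Int) (x : Int) (h : l ≠ []) :
    pvDiffs (l ++ [x]) = pvDiffs l ++ [x - l.getLastD 0] := by
  induction l with
  | nil => exact absurd rfl h
  | cons a l ih =>
    cases l with
    | nil => simp [pvDiffs]
    | cons b l' =>
      have := ih (by simp)
      simp only [pvDiffs, List.cons_append, List.tail_cons, List.zip_cons_cons,
        List.map_cons] at this ⊢
      simp [this]

lemma pvPos_append (t : List Char) (c : Char) :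
    pvPos (t ++ [c]) =
      pvPos t ++ (if c ∈ pvVowels then [1 + (t.length : Int)] else []) := by
  simp only [pvPos, PySem.List.enumerate_append, PySem.List.enumerate_cons,
    PySem.List.enumerate_nil, List.filter_append, List.map_append]
  by_cases hc : c ∈ pvVowels <;> simp [hc]

lemma pvPos_one_le (t : List Char) : ∀ p ∈ pvPos t, 1 ≤ p := by
  intro p hp
  simp only [pvPos, List.mem_map, List.mem_filter] at hp
  obtain ⟨q, ⟨hq, _⟩, rfl⟩ := hp
  rw [PySem.List.mem_enumerate_iff] at hq
  obtain ⟨k, hk, rfl⟩ := hq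
  simp

lemma pvGetLastD_cons_append (y x : Int) (l : List Int) : (y :: (l ++ [x])).getLastD 0 = x := by
  induction l generalizing y with
  | nil => rfl
  | cons a l ih => exact ih a

-- A's loop computes 0 :: pairwise gaps of the boundaries 0 :: positions, and the last boundary
lemma pvKey (t : List Char) :
    ((PySem.List.pyRange 1 ((t.length : Int) + 1)).foldl
      (fun (st : List Int × Int) i =>
        if PySem.List.pyGetD t (i - 1) ' ' ∈ pvVowels then (st.1 ++ [i - st.2], i) else st)
      ([0], 0))
    = (0 :: pvDiffs (0 :: pvPos t), (0 :: pvPos t).getLastD 0) := by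
  induction t using List.reverseRecOn with
  | nil => simp [PySem.List.pyRange, pvPos, pvDiffs, PySem.List.enumerate_nil]
  | append_singleton t c ih =>
    have hlen : ((t ++ [c]).length : Int) + 1 = ((t.length : Int) + 1) + 1 := by
      simp
    rw [hlen, PySem.List.pyRange_one_succ_right (by omega), List.foldl_append]
    have hcongr :
        ((PySem.List.pyRange 1 ((t.length : Int) + 1)).foldl
          (fun (st : List Int × Int) i =>
            if PySem.List.pyGetD (t ++ [c]) (i - 1) ' ' ∈ pvVowels then (st.1 ++ [i - st.2], i) else st)
          ([0], 0))
        = ((PySem.List.pyRange 1 ((t.length : Int) + 1)).foldl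
          (fun (st : List Int × Int) i =>
            if PySem.List.pyGetD t (i - 1) ' ' ∈ pvVowels then (st.1 ++ [i - st.2], i) else st)
          ([0], 0)) := by
      apply PySem.List.foldl_congr_mem
      intro acc i hi
      rw [PySem.List.mem_pyRange_one] at hi
      have h1 : PySem.List.pyGetD (t ++ [c]) (i - 1) ' ' = PySem.List.pyGetD t (i - 1) ' ' := by
        rw [PySem.List.pyGetD_eq_getElem _ _ (by omega)
              (by simp only [List.length_append, List.length_cons, List.length_nil]; omega),
            PySem.List.pyGetD_eq_getElem _ _ (by omega) (by omega)]
        exact List.getElem_append_left (by omega)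
      rw [h1]
    rw [hcongr, ih]
    have hget : PySem.List.pyGetD (t ++ [c]) ((t.length : Int) + 1 - 1) ' ' = c := by
      have : (t.length : Int) + 1 - 1 = ((t.length : Nat) : Int) := by omega
      rw [this, PySem.List.pyGetD_natCast]
      simp [List.getD]
    simp only [List.foldl_cons, List.foldl_nil, hget, pvPos_append]
    by_cases hc : c ∈ pvVowels
    · simp only [hc, if_true]
      have hne : (0 :: pvPos t) ≠ [] := by simp
      have hcomm : 1 + (t.length : Int) = (t.length : Int) + 1 := by omega
      rw [hcomm, ← List.cons_append, pvDiffs_append _ _ hne]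
      simp only [Prod.mk.injEq]
      exact ⟨rfl, (pvGetLastD_cons_append 0 _ _).symm⟩
    · simp [hc]

lemma pvMaxD_cons_zero (ys : List Int) (h : ys ≠ []) (h0 : 0 ≤ ys.headI) :
    PySem.List.maxD (0 :: ys) (fun x => x) 0 = PySem.List.maxD ys (fun x => x) 0 := by
  cases ys with
  | nil => exact absurd rfl h
  | cons d rest =>
    simp only [PySem.List.maxD, PySem.List.max?_id_cons, Option.getD_some, List.foldl_cons]
    have : max 0 d = d := max_eq_right (by simpa using h0)
    rw [this]

-- ===== VERDICT (by name: the statement is the Claim_ definition above) =====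
set_option maxHeartbeats 800000 in
theorem func_spec : Claim_equal_func := by
  intro args _
  unfold Spec_func func func_alt
  simp only [PySem.List.len_eq, PySem.List.slice_from_one]
  rw [pvKey (PySem.Chars.strip args.toList)]
  set t := PySem.Chars.strip args.toList with ht
  dsimp only
  have hpos : List.map (fun x => x.1)
      (List.filter (fun p => decide (p.2 ∈ pvVowels)) (PySem.List.enumerate t 1)) = pvPos t := rfl
  rw [hpos]
  set P := pvPos t with hP
  have hbnd : [(0 : Int)] ++ P ++ [(t.length : Int) + 1] = (0 :: P) ++ [(t.length : Int) + 1] := by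
    simp
  rw [hbnd]
  have hdiffs : pvDiffs ((0 :: P) ++ [(t.length : Int) + 1])
      = pvDiffs (0 :: P) ++ [(t.length : Int) + 1 - (0 :: P).getLastD 0] :=
    pvDiffs_append _ _ (by simp)
  have hzip : (((0 :: P) ++ [(t.length : Int) + 1]).zip
        (((0 :: P) ++ [(t.length : Int) + 1]).tail)).map (fun p => p.2 - p.1)
      = pvDiffs ((0 :: P) ++ [(t.length : Int) + 1]) := rfl
  rw [hzip, hdiffs]
  have harr : (t.length : Int) - (0 :: P).getLastD 0 + 1
      = (t.length : Int) + 1 - (0 :: P).getLastD 0 := by omega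
  rw [harr]
  refine congrArg (fun v => [v]) ?_
  have hne : pvDiffs (0 :: P) ++ [(t.length : Int) + 1 - (0 :: P).getLastD 0] ≠ [] := by simp
  rw [List.cons_append]
  apply pvMaxD_cons_zero _ hne
  -- head of the full gap list is nonnegative: first gap is the first vowel position (≥ 1),
  -- or len+1 when there is no vowel
  cases hPc : P with
  | nil => simp [pvDiffs]; omega
  | cons p P' =>
    have hp : 1 ≤ p := pvPos_one_le t p (by rw [← hP, hPc]; simp)
    simp [pvDiffs]; omega
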